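-- pv_equiv track=rewrite | github.com/ulugbekerkinovich2/Navigator-generator | main.py | _normalize_waypoints_for_directions
-- ===== SOURCE A (Python) =====
-- from typing import List, Optional, Dict, Any
--
-- def _normalize_waypoints_for_directions(
--     waypoints: Optional[List[str]],
--     add_via_prefix: bool = True,
--     max_points: int = 20,
-- ) -> List[str]:
--     """
--     Waypointlarni tozalash:
--     - bo'shlarini tashlab yuboradi
--     - takrorlarini olib tashlaydi
--     - kerak bo'lsa boshiga 'via:' qo'shib qo'yadi (Directions URL uchun)
--     """
--     if not waypoints:
--         return []
--
--     cleaned: List[str] = []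
--     seen = set()
--
--     for w in waypoints:
--         if not w:
--             continue
--         w = str(w).strip()
--         if not w:
--             continue
--
--         # if add_via_prefix and not w.lower().startswith("via:"):
--         #     w = f"via:{w}"
--
--         key = w.lower()
--         if key in seen:
--             continue
--
--         seen.add(key)
--         cleaned.append(w)
--
--         if len(cleaned) >= max_points:
--             break
--
--     return cleaned
-- ===== SOURCE B (Python) =====
-- def _normalize_waypoints_for_directions(waypoints, add_via_prefix=True, max_points=20):
--     if not waypoints:
--         return []
--     stripped = [str(w).strip() for w in waypoints if w]
--     nonblank = [s for s in stripped if s]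
--     keys = [s.lower() for s in nonblank]
--     deduped = [s for i, s in enumerate(nonblank) if s.lower() not in keys[:i]]
--     return deduped[:max(0, max_points)]
-- ===== Notes on version B (the rewrite author's own statement) =====
-- stated objective: simpler
-- what changed: Replaces A's fused stateful scan (seen-set + append + early break on the cap) by staged passes: strip-and-filter comprehensions, then a dedup comprehension keeping each element whose lowercased key is absent from the keys of its prefix, then one final truncation to max(0, max_points).
-- intended difference: When max_points <= 0 and some waypoint is non-blank, A still returns the first unique waypoint (its break fires only after the first append) while B returns an empty list, which is the intended meaning of a non-positive cap. — e.g. on _normalize_waypoints_for_directions(some ["x"], true, 0): A returns ["x"], B returns []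
import Mathlib
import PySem

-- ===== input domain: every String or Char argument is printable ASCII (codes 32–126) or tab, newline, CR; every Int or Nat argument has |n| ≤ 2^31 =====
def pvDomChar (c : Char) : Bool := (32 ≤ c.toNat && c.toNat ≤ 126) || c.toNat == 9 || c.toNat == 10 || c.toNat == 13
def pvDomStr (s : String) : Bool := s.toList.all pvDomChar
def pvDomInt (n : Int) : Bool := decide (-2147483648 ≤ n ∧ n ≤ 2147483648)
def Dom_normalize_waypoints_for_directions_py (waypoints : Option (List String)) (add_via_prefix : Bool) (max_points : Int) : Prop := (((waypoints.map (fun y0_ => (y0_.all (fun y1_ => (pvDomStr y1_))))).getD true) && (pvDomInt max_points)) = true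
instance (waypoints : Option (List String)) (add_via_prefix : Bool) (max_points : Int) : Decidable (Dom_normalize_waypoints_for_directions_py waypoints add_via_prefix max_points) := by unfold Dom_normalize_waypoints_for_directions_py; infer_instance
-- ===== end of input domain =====

-- B replaces A's fused scan-with-early-break (seen-set + append + break) by staged passes:
-- strip/filter, then a quadratic prefix-membership dedup comprehension, then a final truncation
-- to max(0, max_points); simpler decomposition, not faster.


-- ===== PORT A =====
-- the 'for w in waypoints' loop of A, with accumulators cleaned / seen and the early break
def pvLoopA : List String → List String → PySem.Set String → Int → List String
  | [], cleaned, _, _ => cleaned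
  | w :: rest, cleaned, seen, m =>
    if w == "" then pvLoopA rest cleaned seen m
    else
      let w' := PySem.Str.strip w
      if w' == "" then pvLoopA rest cleaned seen m
      else
        let key := PySem.Str.lower w'
        if PySem.Set.contains seen key then pvLoopA rest cleaned seen m
        else
          let cleaned' := cleaned ++ [w']
          if m ≤ (cleaned'.length : Int) then cleaned'
          else pvLoopA rest cleaned' (PySem.Set.add seen key) m

def normalize_waypoints_for_directions_py (waypoints : Option (List String)) (add_via_prefix : Bool) (max_points : Int) : List String :=
  match waypoints with
  | none => []
  | some ws => if ws.isEmpty then [] else pvLoopA ws [] PySem.Set.empty max_points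

-- ===== PORT B =====
-- Source B's staged passes: stripped = [strip(w) for w in ws if w], nonblank = [s for s in stripped if s]
def pvClean (ws : List String) : List String :=
  ((ws.filter (fun w => !(w == ""))).map PySem.Str.strip).filter (fun s => !(s == ""))

def normalize_waypoints_for_directions_py_alt (waypoints : Option (List String)) (add_via_prefix : Bool) (max_points : Int) : List String :=
  match waypoints with
  | none => []
  | some ws =>
    if ws.isEmpty then []
    else
      let nonblank := pvClean ws
      let keys := nonblank.map PySem.Str.lower
      -- [s for i, s in enumerate(nonblank) if s.lower() not in keys[:i]]
      let deduped := ((nonblank.zipIdx).filter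
          (fun p => !((keys.take p.2).contains (PySem.Str.lower p.1)))).map Prod.fst
      deduped.take (max 0 max_points).toNat

-- ===== PRECONDITION & SPEC =====
-- When max_points <= 0 and some waypoint is non-blank, A still returns the first unique waypoint
-- (its break fires only after the first append) while B returns an empty list, the intended value
-- for a non-positive cap.
def D_normalize_waypoints_for_directions_py (waypoints : Option (List String)) (add_via_prefix : Bool) (max_points : Int) : Prop :=
  max_points ≤ 0 ∧ ((waypoints.getD []).any (fun w => !(PySem.Str.strip w == ""))) = true
instance (waypoints : Option (List String)) (add_via_prefix : Bool) (max_points : Int) : Decidable (D_normalize_waypoints_for_directions_py waypoints add_via_prefix max_points) := by unfold D_normalize_waypoints_for_directions_py; infer_instance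

def Spec_normalize_waypoints_for_directions_py (waypoints : Option (List String)) (add_via_prefix : Bool) (max_points : Int) (out : List String) : Prop := ¬ D_normalize_waypoints_for_directions_py waypoints add_via_prefix max_points → out = normalize_waypoints_for_directions_py_alt waypoints add_via_prefix max_points
instance (waypoints : Option (List String)) (add_via_prefix : Bool) (max_points : Int) (out : List String) : Decidable (Spec_normalize_waypoints_for_directions_py waypoints add_via_prefix max_points out) := by unfold Spec_normalize_waypoints_for_directions_py; infer_instance

def pvDiffWitness_normalize_waypoints_for_directions_py : Option (List String) × Bool × Int := (some ["x"], true, 0)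
def pvDiffWitnessOut_normalize_waypoints_for_directions_py : (List String) × (List String) := (["x"], [])

-- ===== CLAIM (what is proved, stated in full; the proofs are below) =====
def Claim_unchanged_normalize_waypoints_for_directions_py : Prop := ∀ (waypoints : Option (List String)) (add_via_prefix : Bool) (max_points : Int), Dom_normalize_waypoints_for_directions_py waypoints add_via_prefix max_points → Spec_normalize_waypoints_for_directions_py waypoints add_via_prefix max_points (normalize_waypoints_for_directions_py waypoints add_via_prefix max_points)
def Claim_changed_normalize_waypoints_for_directions_py : Prop := Dom_normalize_waypoints_for_directions_py (pvDiffWitness_normalize_waypoints_for_directions_py.1) (pvDiffWitness_normalize_waypoints_for_directions_py.2.1) (pvDiffWitness_normalize_waypoints_for_directions_py.2.2) ∧ D_normalize_waypoints_for_directions_py (pvDiffWitness_normalize_waypoints_for_directions_py.1) (pvDiffWitness_normalize_waypoints_for_directions_py.2.1) (pvDiffWitness_normalize_waypoints_for_directions_py.2.2) ∧ normalize_waypoints_for_directions_py (pvDiffWitness_normalize_waypoints_for_directions_py.1) (pvDiffWitness_normalize_waypoints_for_directions_py.2.1) (pvDiffWitness_normalize_waypoints_for_directions_py.2.2) = pvDiffWitnessOut_normalize_waypoints_for_directions_py.1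 ∧ normalize_waypoints_for_directions_py_alt (pvDiffWitness_normalize_waypoints_for_directions_py.1) (pvDiffWitness_normalize_waypoints_for_directions_py.2.1) (pvDiffWitness_normalize_waypoints_for_directions_py.2.2) = pvDiffWitnessOut_normalize_waypoints_for_directions_py.2 ∧ pvDiffWitnessOut_normalize_waypoints_for_directions_py.1 ≠ pvDiffWitnessOut_normalize_waypoints_for_directions_py.2
def Claim_exact_normalize_waypoints_for_directions_py : Prop := ∀ (waypoints : Option (List String)) (add_via_prefix : Bool) (max_points : Int), Dom_normalize_waypoints_for_directions_py waypoints add_via_prefix max_points → D_normalize_waypoints_for_directions_py waypoints add_via_prefix max_points → normalize_waypoints_for_directions_py waypoints add_via_prefix max_points ≠ normalize_waypoints_for_directions_py_alt waypoints add_via_prefix max_points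

-- ===== LEMMAS AND PROOFS =====

-- sequential dedup with an accumulated key list (canonical form both programs reduce to)
def pvDed : List String → List String → List String
  | [], _ => []
  | s :: rest, ks =>
    if ks.contains (PySem.Str.lower s) then pvDed rest ks
    else s :: pvDed rest (ks ++ [PySem.Str.lower s])

-- raw variant running directly on the unstripped input
def pvDedRaw : List String → List String → List String
  | [], _ => []
  | w :: rest, ks =>
    if w == "" then pvDedRaw rest ks
    else
      if PySem.Str.strip w == "" then pvDedRaw rest ks
      else if ks.contains (PySem.Str.lower (PySem.Str.strip w)) then pvDedRaw rest ks
      else PySem.Str.strip w :: pvDedRaw rest (ks ++ [PySem.Str.lower (PySem.Str.strip w)])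

theorem pvDed_congr (xs : List String) (ks ks' : List String)
    (h : ∀ k, ks.contains k = ks'.contains k) : pvDed xs ks = pvDed xs ks' := by
  induction xs generalizing ks ks' with
  | nil => rfl
  | cons s rest ih =>
    simp only [pvDed, h]
    split
    · exact ih ks ks' h
    · rw [ih (ks ++ [PySem.Str.lower s]) (ks' ++ [PySem.Str.lower s])
        (fun k => by simp only [List.contains_append, h k])]

theorem pvDed_clean (ws ks : List String) : pvDed (pvClean ws) ks = pvDedRaw ws ks := by
  induction ws generalizing ks with
  | nil => rfl
  | cons w rest ih =>
    simp only [pvClean] at ih ⊢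
    simp only [pvDedRaw, List.filter_cons]
    cases hw : (w == "") with
    | true =>
      simp only [hw, Bool.not_true, Bool.false_eq_true, if_false, if_true]
      exact ih ks
    | false =>
      simp only [hw, Bool.not_false, if_true, Bool.false_eq_true, if_false, List.map_cons,
        List.filter_cons]
      cases hs : (PySem.Str.strip w == "") with
      | true =>
        simp only [hs, Bool.not_true, Bool.false_eq_true, if_false, if_true]
        exact ih ks
      | false =>
        simp only [hs, Bool.not_false, if_true, pvDed]
        split
        · exact ih ks
        · rw [ih (ks ++ [PySem.Str.lower (PySem.Str.strip w)])]
          simp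

-- B's enumerate-comprehension equals the sequential dedup
theorem pvDed_zip (xs ks : List String) :
    (((xs.zipIdx ks.length).filter
        (fun p => !(((ks ++ xs.map PySem.Str.lower).take p.2).contains (PySem.Str.lower p.1)))).map
      Prod.fst) = pvDed xs ks := by
  induction xs generalizing ks with
  | nil => rfl
  | cons x rest ih =>
    simp only [List.zipIdx_cons, List.filter_cons, List.map_cons, List.take_left, pvDed]
    have hkeys : ks ++ PySem.Str.lower x :: rest.map PySem.Str.lower
        = (ks ++ [PySem.Str.lower x]) ++ rest.map PySem.Str.lower := by simp
    have hlen : ks.length + 1 = (ks ++ [PySem.Str.lower x]).length := by simp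
    cases hc : ks.contains (PySem.Str.lower x) with
    | true =>
      simp only [hc, Bool.not_true, Bool.false_eq_true, if_false, if_true]
      rw [hkeys, hlen, ih (ks ++ [PySem.Str.lower x]),
        pvDed_congr rest (ks ++ [PySem.Str.lower x]) ks
          (fun k => by
            rcases eq_or_ne k (PySem.Str.lower x) with rfl | hne
            · have : PySem.Str.lower x ∈ ks := by
                simpa [List.contains_eq_mem] using hc
              simp [List.contains_append, List.contains_eq_mem, this]
            · simp [List.contains_append, List.contains_eq_mem, hne])]
    | false =>
      simp only [hc, Bool.not_false, if_true, Bool.false_eq_true, if_false, List.map_cons]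
      rw [hkeys, hlen, ih (ks ++ [PySem.Str.lower x])]

-- main invariant: while the cap is not yet reached, A's loop appends the truncated dedup
theorem pvLoopA_eq (ws : List String) (cleaned : List String) (seen : PySem.Set String)
    (ks : List String) (m : Int)
    (hc : ∀ k, PySem.Set.contains seen k = ks.contains k)
    (hlt : (cleaned.length : Int) < m) :
    pvLoopA ws cleaned seen m = cleaned ++ (pvDedRaw ws ks).take (m - cleaned.length).toNat := by
  induction ws generalizing cleaned seen ks with
  | nil => simp [pvLoopA, pvDedRaw]
  | cons w rest ih =>
    simp only [pvLoopA, pvDedRaw]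
    cases hw : (w == "") with
    | true => simp only [if_true]; exact ih cleaned seen ks hc hlt
    | false =>
      simp only [Bool.false_eq_true, if_false]
      cases hs : (PySem.Str.strip w == "") with
      | true => simp only [if_true]; exact ih cleaned seen ks hc hlt
      | false =>
        simp only [Bool.false_eq_true, if_false]
        cases hk : ks.contains (PySem.Str.lower (PySem.Str.strip w)) with
        | true =>
          rw [hc, hk]
          simp only [if_true]
          exact ih cleaned seen ks hc hlt
        | false =>
          rw [hc, hk]
          simp only [Bool.false_eq_true, if_false]
          have htk : (m - cleaned.length).toNat = ((m - (cleaned.length + 1)).toNat) + 1 := by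
            omega
          rw [htk, List.take_succ_cons]
          by_cases hbrk : m ≤ ((cleaned ++ [PySem.Str.strip w]).length : Int)
          · rw [if_pos hbrk]
            have h0 : (m - (cleaned.length + 1)).toNat = 0 := by
              simp only [List.length_append, List.length_cons, List.length_nil] at hbrk; omega
            simp [h0]
          · rw [if_neg hbrk]
            have hlt' : (((cleaned ++ [PySem.Str.strip w]).length : Nat) : Int) < m := by
              simp only [List.length_append, List.length_cons, List.length_nil] at hbrk ⊢; omega
            rw [ih (cleaned ++ [PySem.Str.strip w])
              (PySem.Set.add seen (PySem.Str.lower (PySem.Str.strip w)))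
              (ks ++ [PySem.Str.lower (PySem.Str.strip w)])
              (fun k => by
                rw [Bool.eq_iff_iff, PySem.Set.contains_iff, PySem.Set.mem_add,
                  List.contains_append, Bool.or_eq_true]
                have h2 : k ∈ seen ↔ ks.contains k = true := by
                  rw [← hc k]; exact (PySem.Set.contains_iff _ _).symm
                have h3 : List.contains [PySem.Str.lower (PySem.Str.strip w)] k = true
                    ↔ k = PySem.Str.lower (PySem.Str.strip w) := by
                  simp [List.contains_eq_mem]
                rw [h3, h2])
              hlt']
            simp only [List.length_append, List.length_cons, List.length_nil, List.append_assoc,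
              List.cons_append, List.nil_append]
            push_cast
            ring_nf

-- if every waypoint strips to blank, A's loop returns its accumulator unchanged
theorem pvLoopA_all_blank (ws : List String) (cleaned : List String) (seen : PySem.Set String)
    (m : Int) (h : ∀ w ∈ ws, PySem.Str.strip w = "") : pvLoopA ws cleaned seen m = cleaned := by
  induction ws generalizing cleaned seen with
  | nil => rfl
  | cons w rest ih =>
    have hs : (PySem.Str.strip w == "") = true := by simpa using h w (by simp)
    have hrest : ∀ x ∈ rest, PySem.Str.strip x = "" := fun x hx => h x (List.mem_cons_of_mem _ hx)
    simp only [pvLoopA]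
    cases hw : (w == "") with
    | true => simp only [if_true]; exact ih _ _ hrest
    | false =>
      simp only [Bool.false_eq_true, if_false, hs, if_true]
      exact ih _ _ hrest

-- if every waypoint strips to blank, B's cleaning pass is empty
theorem pvClean_all_blank (ws : List String) (h : ∀ w ∈ ws, PySem.Str.strip w = "") :
    pvClean ws = [] := by
  simp only [pvClean, List.filter_eq_nil_iff]
  intro s hs
  simp only [List.mem_map, List.mem_filter] at hs
  obtain ⟨w, ⟨hw, _⟩, rfl⟩ := hs
  simp [h w hw]

-- with a non-positive cap and a non-blank waypoint, A returns a non-empty list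
theorem pvLoopA_ne_nil (ws : List String) (seen : PySem.Set String) (m : Int)
    (hm : m ≤ 0) (hseen : ∀ k, PySem.Set.contains seen k = false)
    (hne : ∃ w ∈ ws, PySem.Str.strip w ≠ "") :
    pvLoopA ws [] seen m ≠ [] := by
  induction ws with
  | nil => simp at hne
  | cons w rest ih =>
    simp only [pvLoopA]
    by_cases hs : PySem.Str.strip w = ""
    · have hrest : ∃ x ∈ rest, PySem.Str.strip x ≠ "" := by
        obtain ⟨x, hx, hxs⟩ := hne
        rw [List.mem_cons] at hx
        rcases hx with hx | hx
        · exact absurd hs (hx ▸ hxs)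
        · exact ⟨x, hx, hxs⟩
      have hs' : (PySem.Str.strip w == "") = true := by simpa using hs
      cases hw : (w == "") with
      | true => simp only [if_true]; exact ih hrest
      | false =>
        simp only [Bool.false_eq_true, if_false, hs', if_true]
        exact ih hrest
    · have hw : (w == "") = false := by
        cases hww : (w == "") with
        | false => rfl
        | true =>
          have : w = "" := by simpa using hww
          exact absurd (by rw [this]; rfl : PySem.Str.strip w = "") hs
      have hs' : (PySem.Str.strip w == "") = false := by simpa using hs
      simp only [hw, Bool.false_eq_true, if_false, hs', hseen, List.nil_append,
        List.length_cons, List.length_nil]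
      rw [if_pos (by omega)]
      simp

-- ===== VERDICT (by name: the statement is the Claim_ definition above) =====
theorem normalize_waypoints_for_directions_py_spec : Claim_unchanged_normalize_waypoints_for_directions_py := by
  intro waypoints add_via_prefix m _ hnD
  unfold D_normalize_waypoints_for_directions_py at hnD
  match waypoints with
  | none => rfl
  | some ws =>
    simp only [normalize_waypoints_for_directions_py, normalize_waypoints_for_directions_py_alt]
    cases hws : ws.isEmpty with
    | true => simp only [if_true]
    | false =>
      simp only [Bool.false_eq_true, if_false]
      have hzip := pvDed_zip (pvClean ws) []
      simp only [List.length_nil, List.nil_append] at hzip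
      rw [hzip, pvDed_clean]
      by_cases hm : m ≤ 0
      · have hall : ∀ w ∈ ws, PySem.Str.strip w = "" := by
          by_contra h
          push_neg at h
          refine hnD ⟨hm, ?_⟩
          simp only [Option.getD_some, List.any_eq_true]
          obtain ⟨x, hx, hxs⟩ := h
          exact ⟨x, hx, by simpa using hxs⟩
        rw [pvLoopA_all_blank ws [] _ m hall, ← pvDed_clean, pvClean_all_blank ws hall]
        simp [pvDed]
      · have := pvLoopA_eq ws [] PySem.Set.empty [] m (fun k => rfl)
          (by simp only [List.length_nil, Int.natCast_zero]; omega)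
        rw [this]
        simp only [List.length_nil, Int.natCast_zero, List.nil_append]
        congr 1
        omega

theorem normalize_waypoints_for_directions_py_changed : Claim_changed_normalize_waypoints_for_directions_py := by
  unfold Claim_changed_normalize_waypoints_for_directions_py; decide

theorem normalize_waypoints_for_directions_py_tight : Claim_exact_normalize_waypoints_for_directions_py := by
  intro waypoints add_via_prefix m _ hD
  obtain ⟨hm, hany⟩ := hD
  match waypoints with
  | none => simp at hany
  | some ws =>
    have hne : ∃ w ∈ ws, PySem.Str.strip w ≠ "" := by
      simp only [Option.getD_some, List.any_eq_true] at hany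
      obtain ⟨x, hx, hxs⟩ := hany
      exact ⟨x, hx, by simpa using hxs⟩
    have hws : ws.isEmpty = false := by
      obtain ⟨w, hw, _⟩ := hne
      cases ws with
      | nil => simp at hw
      | cons _ _ => rfl
    simp only [normalize_waypoints_for_directions_py, normalize_waypoints_for_directions_py_alt,
      hws, Bool.false_eq_true, if_false]
    have h0 : (max 0 m).toNat = 0 := by omega
    rw [h0]
    simp only [List.take_zero]
    exact pvLoopA_ne_nil ws _ m hm (fun k => rfl) hne
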